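-- pv_equiv track=rewrite | github.com/Aks-Dmv/AROC | Navi/envs/Navigation_env.py | _StateToDecimal
-- ===== SOURCE A (Python) =====
-- def _StateToDecimal(binaryValue):
--     DecValue=0
--     # the for loop converts binary to decimal
--     for i in range(3):
--         DecValue=DecValue*2
--         DecValue+=binaryValue[i+1]
--
--     # To get the sign
--     if(binaryValue[0]== -1):
--         DecValue=DecValue*binaryValue[0]
--     return DecValue, binaryValue[-1]
-- ===== SOURCE B (Python) =====
-- def _fromBits(binaryValue, k):
--     # recursive big-endian interpretation of bits 1..k:
--     # value = 2 * (value of bits 1..k-1) + bit k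
--     if k == 0:
--         return 0
--     return 2 * _fromBits(binaryValue, k - 1) + binaryValue[k]
--
-- def _StateToDecimal(binaryValue):
--     magnitude = _fromBits(binaryValue, 3)
--     sign = -1 if binaryValue[0] == -1 else 1
--     return sign * magnitude, binaryValue[-1]
-- ===== Notes on version B (the rewrite author's own statement) =====
-- stated objective: alternative
-- what changed: Replaces A's iterative shift-accumulate loop over range(3) by a recursive helper that interprets the magnitude bits right-to-left (value(k) = 2*value(k-1) + bit k), and applies the sign as a multiplier computed once instead of conditionally multiplying the accumulator by binaryValue[0].
import Mathlib
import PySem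

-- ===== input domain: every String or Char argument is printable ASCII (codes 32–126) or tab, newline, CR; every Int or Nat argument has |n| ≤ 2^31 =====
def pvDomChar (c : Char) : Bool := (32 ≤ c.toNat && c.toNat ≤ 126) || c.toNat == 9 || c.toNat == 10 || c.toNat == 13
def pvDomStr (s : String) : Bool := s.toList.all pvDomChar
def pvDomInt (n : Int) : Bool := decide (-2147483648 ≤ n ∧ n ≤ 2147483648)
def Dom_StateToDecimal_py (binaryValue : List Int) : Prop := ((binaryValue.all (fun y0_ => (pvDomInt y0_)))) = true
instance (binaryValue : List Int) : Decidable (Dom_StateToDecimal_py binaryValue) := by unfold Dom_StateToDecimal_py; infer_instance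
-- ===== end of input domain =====

-- B slices out the three magnitude bits and interprets them with a recursive
-- right-to-left helper, applying the sign as a multiplier (alternative decomposition).

-- ===== PORT A =====
def StateToDecimal_py (binaryValue : List Int) : Int × Int :=
  let dec := (PySem.List.pyRange 0 3 1).foldl
    (fun d i => d * 2 + PySem.List.pyGetD binaryValue (i + 1) 0) 0
  let dec := if PySem.List.pyGetD binaryValue 0 0 = -1
             then dec * PySem.List.pyGetD binaryValue 0 0 else dec
  (dec, PySem.List.pyGetD binaryValue (-1) 0)

-- ===== PORT B =====
-- recursive helper _fromBits(binaryValue, k): 0 at k=0, else 2*rec + binaryValue[k]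
def fromBits_alt (binaryValue : List Int) : Nat → Int
  | 0 => 0
  | k + 1 => 2 * fromBits_alt binaryValue k + PySem.List.pyGetD binaryValue ((k : Int) + 1) 0

def StateToDecimal_py_alt (binaryValue : List Int) : Int × Int :=
  let magnitude := fromBits_alt binaryValue 3
  let sign : Int := if PySem.List.pyGetD binaryValue 0 0 = -1 then -1 else 1
  (sign * magnitude, PySem.List.pyGetD binaryValue (-1) 0)

-- ===== PRECONDITION & SPEC =====
-- Python A indexes positions 1,2,3 and 0, so it raises IndexError on lists shorter than 4.
def Pre_StateToDecimal_py (binaryValue : List Int) : Prop := 4 ≤ binaryValue.length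
instance (binaryValue : List Int) : Decidable (Pre_StateToDecimal_py binaryValue) := by unfold Pre_StateToDecimal_py; infer_instance
def pvWitness_StateToDecimal_py : List Int := [-1, 1, 0, 1]
def Spec_StateToDecimal_py (binaryValue : List Int) (out : Int × Int) : Prop := out = StateToDecimal_py_alt binaryValue
instance (binaryValue : List Int) (out : Int × Int) : Decidable (Spec_StateToDecimal_py binaryValue out) := by unfold Spec_StateToDecimal_py; infer_instance

-- ===== CLAIM (what is proved, stated in full; the proofs are below) =====
def Claim_equal_StateToDecimal_py : Prop := ∀ (binaryValue : List Int), Dom_StateToDecimal_py binaryValue → Pre_StateToDecimal_py binaryValue → Spec_StateToDecimal_py binaryValue (StateToDecimal_py binaryValue)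

-- ===== LEMMAS AND PROOFS =====

-- ===== VERDICT (by name: the statement is the Claim_ definition above) =====
theorem StateToDecimal_py_spec : Claim_equal_StateToDecimal_py := by
  intro bv _ hpre
  obtain ⟨a, b, c, d, rest, rfl⟩ : ∃ a b c d rest, bv = a :: b :: c :: d :: rest := by
    match bv with
    | a :: b :: c :: d :: rest => exact ⟨a, b, c, d, rest, rfl⟩
    | [] | [_] | [_,_] | [_,_,_] => simp [Pre_StateToDecimal_py] at hpre
  unfold Spec_StateToDecimal_py StateToDecimal_py StateToDecimal_py_alt
  have hr : PySem.List.pyRange 0 3 1 = [0, 1, 2] := by decide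
  have g0 : PySem.List.pyGetD (a :: b :: c :: d :: rest) 0 0 = a := by simp [pysem]
  have g1 : PySem.List.pyGetD (a :: b :: c :: d :: rest) 1 0 = b := by simp [pysem]
  have g2 : PySem.List.pyGetD (a :: b :: c :: d :: rest) 2 0 = c := by simp [pysem]
  have g3 : PySem.List.pyGetD (a :: b :: c :: d :: rest) 3 0 = d := by simp [pysem]
  have hf : fromBits_alt (a :: b :: c :: d :: rest) 3 = 2 * (2 * (2 * 0 + b) + c) + d := by
    show 2 * (2 * (2 * fromBits_alt _ 0 + PySem.List.pyGetD _ ((0 : Nat) + 1 : Int) 0)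
        + PySem.List.pyGetD _ ((1 : Nat) + 1 : Int) 0) + PySem.List.pyGetD _ ((2 : Nat) + 1 : Int) 0
      = 2 * (2 * (2 * 0 + b) + c) + d
    norm_num [fromBits_alt, g1, g2, g3]
  rw [hr, hf]
  simp only [List.foldl]
  norm_num [g0, g1, g2, g3]
  split_ifs with h
  · rw [h]; ring
  · ring
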